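-- pv_equiv track=rewrite | github.com/Arturok/TEC | Diseño Logico/Código de Hamming/hamming.py | llenarP3
-- ===== SOURCE A (Python) =====
-- def llenarP3(bits,parid):
--     ocupo=[1,2,3,7,8,9,10]
--     check=""
--     #bits=setBitsParidad(bits)
--     for i in range(0,len(bits)):
--         if(i in ocupo):
--             check+=bits[i]
--     check=paridad(check,parid)+check
--     return check
--
-- def paridad(check, par):
--     numUnos = contarUnos(check)
--     if(par):
--         if(numUnos%2==0):
--             return "0"
--         else:
--             return "1"
--     else:
--         if(numUnos%2==0):
--             return "1"
--         else:
--             return "0"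
--
-- def contarUnos(hilera):
--     CantidadUnos=0
--     for i in hilera:
--         if i == "1":
--             CantidadUnos+=1
--     return CantidadUnos
-- ===== SOURCE B (Python) =====
-- def llenarP3(bits, parid):
--     # Two slices replace the per-index scan: the occupied positions 1..3 and
--     # 7..10 are contiguous ranges, and Python slicing clamps automatically
--     # when bits is short.
--     check = bits[1:4] + bits[7:11]
--     p = check.count('1') % 2
--     return ("1" if (p == 1) == bool(parid) else "0") + check
-- ===== Notes on version B (the rewrite author's own statement) =====
-- stated objective: faster
-- what changed: B extracts the occupied positions with two string slices bits[1:4] + bits[7:11] (Python slicing clamps short strings) instead of scanning every index of bits and testing membership in ocupo, and derives the parity bit from check.count('1') % 2 instead of a counting loop plus a four-way if/else.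
import Mathlib
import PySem

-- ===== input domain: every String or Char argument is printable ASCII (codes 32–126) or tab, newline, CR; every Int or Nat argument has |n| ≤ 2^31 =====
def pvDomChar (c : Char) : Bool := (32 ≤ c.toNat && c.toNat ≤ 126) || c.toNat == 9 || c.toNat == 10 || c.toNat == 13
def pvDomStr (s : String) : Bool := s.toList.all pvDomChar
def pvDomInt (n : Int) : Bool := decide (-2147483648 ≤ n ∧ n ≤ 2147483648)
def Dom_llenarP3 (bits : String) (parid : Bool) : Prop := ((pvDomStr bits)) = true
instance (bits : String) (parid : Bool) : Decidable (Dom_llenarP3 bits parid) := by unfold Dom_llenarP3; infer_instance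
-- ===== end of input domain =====

-- B replaces A's index scan (membership test against ocupo on every index) by two
-- string slices over the contiguous ranges 1:4 and 7:11 and a count-based parity bit.

-- ===== PORT A =====
-- helper contarUnos: counts '1' characters by a fold, as the Python loop does
def contarUnosA (hilera : List Char) : Int :=
  hilera.foldl (fun acc i => if i == '1' then acc + 1 else acc) 0

-- helper paridad: same branch order as the Python
def paridadA (check : List Char) (par : Bool) : List Char :=
  let numUnos := contarUnosA check
  if par then
    (if PySem.Int.mod numUnos 2 == 0 then ['0'] else ['1'])
  else
    (if PySem.Int.mod numUnos 2 == 0 then ['1'] else ['0'])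

def llenarP3 (bits : String) (parid : Bool) : String :=
  let ocupo : List Int := [1, 2, 3, 7, 8, 9, 10]
  let l := bits.toList
  -- for i in range(0, len(bits)): if i in ocupo: check += bits[i]
  -- (bits[i] is always in range inside the loop, so pyGetD is exact here)
  let check : List Char :=
    (PySem.List.pyRange 0 (l.length : Int) 1).foldl
      (fun acc i => if i ∈ ocupo then acc ++ [PySem.List.pyGetD l i default] else acc) []
  String.ofList (paridadA check parid ++ check)

-- ===== PORT B =====
def llenarP3_alt (bits : String) (parid : Bool) : String :=
  let l := bits.toList
  -- check = bits[1:4] + bits[7:11]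
  let check : List Char :=
    PySem.List.slice l (some 1) (some 4) ++ PySem.List.slice l (some 7) (some 11)
  -- p = check.count('1') % 2
  let p : Int := PySem.Int.mod ((check.count '1' : Nat) : Int) 2
  String.ofList ((if (p == 1) == parid then ['1'] else ['0']) ++ check)

-- ===== PRECONDITION & SPEC =====
def Spec_llenarP3 (bits : String) (parid : Bool) (out : String) : Prop := out = llenarP3_alt bits parid
instance (bits : String) (parid : Bool) (out : String) : Decidable (Spec_llenarP3 bits parid out) := by unfold Spec_llenarP3; infer_instance

-- ===== CLAIM (what is proved, stated in full; the proofs are below) =====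
def Claim_equal_llenarP3 : Prop := ∀ (bits : String) (parid : Bool), Dom_llenarP3 bits parid → Spec_llenarP3 bits parid (llenarP3 bits parid)

-- ===== LEMMAS AND PROOFS =====

-- A's filtered scan of range(len) picks exactly the occupied positions below len.
lemma filter_range_mem_ocupo (n : Nat) :
    (PySem.List.pyRange 0 (n : Int) 1).filter
        (fun i => decide (i ∈ ([1, 2, 3, 7, 8, 9, 10] : List Int)))
      = ([1, 2, 3, 7, 8, 9, 10] : List Int).filter (fun i => decide (i < (n : Int))) := by
  induction n with
  | zero => decide
  | succ m ih =>
    have hsplit : PySem.List.pyRange 0 ((m + 1 : Nat) : Int) 1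
        = PySem.List.pyRange 0 (m : Int) 1 ++ [(m : Int)] := by
      have : ((m + 1 : Nat) : Int) = (m : Int) + 1 := by push_cast; ring
      rw [this, PySem.List.pyRange_one_succ_right (by exact_mod_cast Nat.zero_le m)]
    rw [hsplit, List.filter_append, ih]
    by_cases hm : m < 12
    · interval_cases m <;> decide
    · have h1 : (([1, 2, 3, 7, 8, 9, 10] : List Int).filter (fun i => decide (i < (m : Int))))
          = [1, 2, 3, 7, 8, 9, 10] := by
        apply List.filter_eq_self.mpr
        intro a ha
        simp only [List.mem_cons, List.not_mem_nil, or_false] at ha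
        simp only [decide_eq_true_eq]
        omega
      have h2 : (([1, 2, 3, 7, 8, 9, 10] : List Int).filter (fun i => decide (i < ((m + 1 : Nat) : Int))))
          = [1, 2, 3, 7, 8, 9, 10] := by
        apply List.filter_eq_self.mpr
        intro a ha
        simp only [List.mem_cons, List.not_mem_nil, or_false] at ha
        simp only [decide_eq_true_eq]
        omega
      have hmem : ¬ ((m : Int) ∈ ([1, 2, 3, 7, 8, 9, 10] : List Int)) := by
        simp only [List.mem_cons, List.not_mem_nil, or_false]
        omega
      have h3 : List.filter (fun i => decide (i ∈ ([1, 2, 3, 7, 8, 9, 10] : List Int))) [(m : Int)] = [] := by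
        simp only [List.filter_cons, List.filter_nil]
        rw [if_neg (by simpa using hmem)]
      rw [h1, h2, h3, List.append_nil]

-- the selected positions, read one by one, are exactly the two slices
lemma sel_eq_slices (l : List Char) :
    (([1, 2, 3, 7, 8, 9, 10] : List Int).filter
        (fun i => decide (i < (l.length : Int)))).map
      (fun i => PySem.List.pyGetD l i default)
      = PySem.List.slice l (some 1) (some 4) ++ PySem.List.slice l (some 7) (some 11) := by
  have h14 : PySem.List.slice l (some 1) (some 4) = (l.drop 1).take 3 := by
    simpa using PySem.List.slice_natCast l 1 4
  have h711 : PySem.List.slice l (some 7) (some 11) = (l.drop 7).take 4 := by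
    simpa using PySem.List.slice_natCast l 7 11
  rw [h14, h711]
  match l with
  | [] => decide
  | [a] => simp
  | [a, b] => simp [PySem.List.pyGetD, PySem.List.pyGet?, PySem.List.pyIdx?]
  | [a, b, c] => simp [PySem.List.pyGetD, PySem.List.pyGet?, PySem.List.pyIdx?]
  | [a, b, c, d] => simp [PySem.List.pyGetD, PySem.List.pyGet?, PySem.List.pyIdx?]
  | [a, b, c, d, e] => simp [PySem.List.pyGetD, PySem.List.pyGet?, PySem.List.pyIdx?]
  | [a, b, c, d, e, f] => simp [PySem.List.pyGetD, PySem.List.pyGet?, PySem.List.pyIdx?]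
  | [a, b, c, d, e, f, g] => simp [PySem.List.pyGetD, PySem.List.pyGet?, PySem.List.pyIdx?]
  | [a, b, c, d, e, f, g, h] => simp [PySem.List.pyGetD, PySem.List.pyGet?, PySem.List.pyIdx?]
  | [a, b, c, d, e, f, g, h, i] => simp [PySem.List.pyGetD, PySem.List.pyGet?, PySem.List.pyIdx?]
  | [a, b, c, d, e, f, g, h, i, j] => simp [PySem.List.pyGetD, PySem.List.pyGet?, PySem.List.pyIdx?]
  | a :: b :: c :: d :: e :: f :: g :: h :: i :: j :: k :: rest =>
      have hf : ([1, 2, 3, 7, 8, 9, 10] : List Int).filter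
          (fun x => decide (x < (((a :: b :: c :: d :: e :: f :: g :: h :: i :: j :: k :: rest) : List Char).length : Int)))
          = [1, 2, 3, 7, 8, 9, 10] := by
        apply List.filter_eq_self.mpr
        intro x hx
        simp only [List.mem_cons, List.not_mem_nil, or_false] at hx
        simp only [List.length_cons, decide_eq_true_eq]
        push_cast
        omega
      rw [hf]
      simp [PySem.List.pyGetD_ofNat', List.getD]

-- both parity computations agree on any check string
lemma parity_eq (cs : List Char) (parid : Bool) :
    paridadA cs parid
      = (if (PySem.Int.mod ((cs.count '1' : Nat) : Int) 2 == 1) == parid then ['1'] else ['0']) := by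
  have hA : contarUnosA cs = ((cs.count '1' : Nat) : Int) := by
    unfold contarUnosA
    simpa using PySem.List.foldl_beq_add_one cs '1' 0
  have hm : PySem.Int.mod ((cs.count '1' : Nat) : Int) 2 = 0
      ∨ PySem.Int.mod ((cs.count '1' : Nat) : Int) 2 = 1 := by
    have h1 := PySem.Int.mod_nonneg ((cs.count '1' : Nat) : Int) (b := 2) (by norm_num)
    have h2 := PySem.Int.mod_lt ((cs.count '1' : Nat) : Int) (b := 2) (by norm_num)
    omega
  rcases hm with h | h <;> cases parid <;> simp only [paridadA, hA, h] <;> decide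

-- ===== VERDICT (by name: the statement is the Claim_ definition above) =====
theorem llenarP3_spec : Claim_equal_llenarP3 := by
  intro bits parid _
  unfold Spec_llenarP3 llenarP3 llenarP3_alt
  have hcheck :
      (PySem.List.pyRange 0 (bits.toList.length : Int) 1).foldl
          (fun acc i => if i ∈ ([1, 2, 3, 7, 8, 9, 10] : List Int)
            then acc ++ [PySem.List.pyGetD bits.toList i default] else acc) []
        = PySem.List.slice bits.toList (some 1) (some 4)
            ++ PySem.List.slice bits.toList (some 7) (some 11) := by
    rw [PySem.List.foldl_append_ite (p := fun i => i ∈ ([1, 2, 3, 7, 8, 9, 10] : List Int))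
        (f := fun i => PySem.List.pyGetD bits.toList i default)]
    rw [filter_range_mem_ocupo, sel_eq_slices]
    rfl
  simp only [hcheck, parity_eq]
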